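-- pv_equiv track=rewrite | github.com/player20/AI-agents | apps/api/src/services/domain_analyzers.py | _detect_component_patterns
-- ===== SOURCE A (Python) =====
-- from typing import Optional, List, Dict, Any, Set
--
-- def _detect_component_patterns(files: Dict[str, str]) -> List[str]:
--     """Detect component organization patterns"""
--     patterns = []
--     paths = list(files.keys())
--
--     # Check for atomic design
--     atomic_dirs = ["atoms", "molecules", "organisms", "templates"]
--     if any(d in p.lower() for p in paths for d in atomic_dirs):
--         patterns.append("Atomic Design")
--
--     # Check for feature-based
--     if any("/features/" in p or "/modules/" in p for p in paths):
--         patterns.append("Feature-based")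
--
--     # Check for component co-location
--     if any(p.endswith('.module.css') or p.endswith('.module.scss') for p in paths):
--         patterns.append("CSS Modules")
--
--     # Check for component-per-folder
--     component_dirs = sum(1 for p in paths if '/components/' in p and p.count('/') > 2)
--     if component_dirs > 5:
--         patterns.append("Component-per-folder")
--
--     if not patterns:
--         patterns.append("Flat structure")
--
--     return patterns
-- ===== SOURCE B (Python) =====
-- def _detect_component_patterns(files):
--     """Detect component organization patterns (single pass over the paths)."""
--     atomic = feature = css = False
--     comp_count = 0
--     for p in files:
--         if not atomic:
--             low = p.lower()
--             atomic = any(d in low for d in ("atoms", "molecules", "organisms", "templates"))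
--         if not feature:
--             feature = "/features/" in p or "/modules/" in p
--         if not css:
--             css = p.endswith('.module.css') or p.endswith('.module.scss')
--         if '/components/' in p and p.count('/') > 2:
--             comp_count += 1
--     patterns = []
--     if atomic:
--         patterns.append("Atomic Design")
--     if feature:
--         patterns.append("Feature-based")
--     if css:
--         patterns.append("CSS Modules")
--     if comp_count > 5:
--         patterns.append("Component-per-folder")
--     return patterns or ["Flat structure"]
-- ===== Notes on version B (the rewrite author's own statement) =====
-- stated objective: alternative
-- what changed: Replaces the four independent comprehension passes over the paths with a single loop maintaining three short-circuited boolean flags and one counter, emitting labels from the flags afterwards.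
import Mathlib
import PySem

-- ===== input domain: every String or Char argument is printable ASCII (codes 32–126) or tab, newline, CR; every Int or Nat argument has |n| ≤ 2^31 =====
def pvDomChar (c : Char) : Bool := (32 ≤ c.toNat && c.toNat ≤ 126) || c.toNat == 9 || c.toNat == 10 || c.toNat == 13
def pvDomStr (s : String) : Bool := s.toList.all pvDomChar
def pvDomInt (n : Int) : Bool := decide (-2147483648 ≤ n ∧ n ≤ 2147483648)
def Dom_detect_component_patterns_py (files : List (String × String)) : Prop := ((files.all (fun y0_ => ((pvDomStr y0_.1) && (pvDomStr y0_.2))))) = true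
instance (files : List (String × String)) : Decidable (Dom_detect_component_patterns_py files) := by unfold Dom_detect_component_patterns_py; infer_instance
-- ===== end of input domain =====

-- B replaces A's four separate comprehension passes over the paths by one fold carrying
-- three booleans and a counter; same output (objective: alternative, same cost).


-- ===== PORT A =====
def detect_component_patterns_py (files : List (String × String)) : List String :=
  let patterns : List String := []
  let paths := (PySem.Dict.ofList files).keys
  let atomic_dirs : List String := ["atoms", "molecules", "organisms", "templates"]
  let patterns := if paths.any (fun p => atomic_dirs.any (fun d => PySem.Str.isIn d (PySem.Str.lower p)))
    then patterns ++ ["Atomic Design"] else patterns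
  let patterns := if paths.any (fun p => PySem.Str.isIn "/features/" p || PySem.Str.isIn "/modules/" p)
    then patterns ++ ["Feature-based"] else patterns
  let patterns := if paths.any (fun p => PySem.Str.endswith p ".module.css" || PySem.Str.endswith p ".module.scss")
    then patterns ++ ["CSS Modules"] else patterns
  let component_dirs : Int := paths.foldl
    (fun acc p => if PySem.Str.isIn "/components/" p && decide ((PySem.Str.count p "/" : Int) > 2) then acc + 1 else acc) 0
  let patterns := if component_dirs > 5 then patterns ++ ["Component-per-folder"] else patterns
  if patterns = [] then ["Flat structure"] else patterns

-- ===== PORT B =====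
def pvStepB (st : Bool × Bool × Bool × Int) (p : String) : Bool × Bool × Bool × Int :=
  let (a, f, c, n) := st
  let a := a || (["atoms", "molecules", "organisms", "templates"].any
                  (fun d => PySem.Str.isIn d (PySem.Str.lower p)))
  let f := f || (PySem.Str.isIn "/features/" p || PySem.Str.isIn "/modules/" p)
  let c := c || (PySem.Str.endswith p ".module.css" || PySem.Str.endswith p ".module.scss")
  let n := if PySem.Str.isIn "/components/" p && decide ((PySem.Str.count p "/" : Int) > 2) then n + 1 else n
  (a, f, c, n)

def detect_component_patterns_py_alt (files : List (String × String)) : List String :=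
  let st := ((PySem.Dict.ofList files).keys).foldl pvStepB (false, false, false, 0)
  let (a, f, c, n) := st
  let patterns := (if a then ["Atomic Design"] else [])
    ++ (if f then ["Feature-based"] else [])
    ++ (if c then ["CSS Modules"] else [])
    ++ (if n > 5 then ["Component-per-folder"] else [])
  if patterns = [] then ["Flat structure"] else patterns

-- ===== PRECONDITION & SPEC =====
def Spec_detect_component_patterns_py (files : List (String × String)) (out : List String) : Prop := out = detect_component_patterns_py_alt files
instance (files : List (String × String)) (out : List String) : Decidable (Spec_detect_component_patterns_py files out) := by unfold Spec_detect_component_patterns_py; infer_instance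

-- ===== CLAIM (what is proved, stated in full; the proofs are below) =====
def Claim_equal_detect_component_patterns_py : Prop := ∀ (files : List (String × String)), Dom_detect_component_patterns_py files → Spec_detect_component_patterns_py files (detect_component_patterns_py files)

-- ===== LEMMAS AND PROOFS =====

-- B's single fold computes A's three `any`s and A's counting fold.
theorem pvStepB_foldl (l : List String) (a f c : Bool) (n : Int) :
    l.foldl pvStepB (a, f, c, n) =
      (a || l.any (fun p => ["atoms", "molecules", "organisms", "templates"].any
                  (fun d => PySem.Str.isIn d (PySem.Str.lower p))),
       f || l.any (fun p => PySem.Str.isIn "/features/" p || PySem.Str.isIn "/modules/" p),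
       c || l.any (fun p => PySem.Str.endswith p ".module.css" || PySem.Str.endswith p ".module.scss"),
       l.foldl (fun acc p => if PySem.Str.isIn "/components/" p && decide ((PySem.Str.count p "/" : Int) > 2) then acc + 1 else acc) n) := by
  induction l generalizing a f c n with
  | nil => simp
  | cons x xs ih =>
      simp only [List.foldl_cons, List.any_cons, pvStepB]
      rw [ih]
      simp [Bool.or_assoc]

-- ===== VERDICT (by name: the statement is the Claim_ definition above) =====
theorem detect_component_patterns_py_spec : Claim_equal_detect_component_patterns_py := by
  intro files _
  show detect_component_patterns_py files = detect_component_patterns_py_alt files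
  unfold detect_component_patterns_py detect_component_patterns_py_alt
  rw [pvStepB_foldl]
  simp only [Bool.false_or]
  split_ifs <;> simp_all
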